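-- pv_equiv track=rewrite | github.com/qqgeogor/kaggle-quora-solution-8th | model_hhy/utils/pos_utils.py | pos_most_same
-- ===== SOURCE A (Python) =====
-- def pos_most_same(pos_1,pos_2):
--     c_p_1 = {}
--     c_p_2 = {}
--     for i in pos_1:
--         if i in c_p_1:
--             c_p_1[i]= c_p_1[i]+1
--         else:
--             c_p_1.setdefault(i,0)
--     for i in pos_2:
--         if i in c_p_2:
--             c_p_2[i]= c_p_2[i]+1
--         else:
--             c_p_2.setdefault(i,0)
--     c_p_1 = list(sorted(c_p_1.items(),key=lambda x:x[1]))
--     c_p_2 = list(sorted(c_p_2.items(), key=lambda x:x[1]))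
--     return c_p_1[len(c_p_1)-1]==c_p_2[len(c_p_2)-1]
-- ===== SOURCE B (Python) =====
-- def _winner(seq):
--     # real counts in one dict pass, then a forward scan keeping the
--     # latest item whose count is >= the best so far
--     counts = {}
--     for t in seq:
--         counts[t] = counts.get(t, 0) + 1
--     best = None
--     for item in counts.items():
--         if best is None or item[1] >= best[1]:
--             best = item
--     return best
--
--
-- def pos_most_same(pos_1, pos_2):
--     return _winner(pos_1) == _winner(pos_2)
-- ===== Notes on version B (the rewrite author's own statement) =====
-- stated objective: simpler
-- what changed: B drops A's sort-the-count-items-then-take-last selection and instead finds each sequence's winning (token, count) pair with a single forward >=-scan over real counts (A stores count-1; the symmetric offset cancels under equality), comparing the two optional winners directly.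
import Mathlib
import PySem

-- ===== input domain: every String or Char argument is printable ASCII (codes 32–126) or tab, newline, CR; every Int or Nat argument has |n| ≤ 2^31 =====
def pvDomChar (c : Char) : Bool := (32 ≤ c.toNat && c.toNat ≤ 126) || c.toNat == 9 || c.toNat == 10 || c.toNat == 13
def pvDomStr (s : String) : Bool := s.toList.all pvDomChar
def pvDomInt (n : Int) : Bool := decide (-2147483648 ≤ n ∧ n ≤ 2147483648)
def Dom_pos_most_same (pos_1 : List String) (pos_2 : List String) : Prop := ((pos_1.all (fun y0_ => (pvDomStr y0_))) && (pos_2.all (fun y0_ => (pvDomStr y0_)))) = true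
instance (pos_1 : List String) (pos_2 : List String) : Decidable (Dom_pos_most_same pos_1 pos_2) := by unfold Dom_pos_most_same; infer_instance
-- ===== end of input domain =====

-- B replaces A's sort-the-counts-then-take-last by a single forward max-scan over real counts (no sort); simpler/alternative.


-- ===== PORT A =====
-- A's counting loop: first occurrence → setdefault(i,0); later occurrences → c[i]+1
def pvCountA (xs : List String) : PySem.Dict String Int :=
  xs.foldl (fun d i => if d.contains i then d.insert i (d.getD i 0 + 1) else d.setdefault i 0)
    PySem.Dict.empty

def pos_most_same (pos_1 : List String) (pos_2 : List String) : Bool :=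
  let c_p_1 := PySem.List.sorted (pvCountA pos_1).items (fun x => x.2)
  let c_p_2 := PySem.List.sorted (pvCountA pos_2).items (fun x => x.2)
  -- c_p_1[len(c_p_1)-1]; out-of-range (empty list) is excluded by Pre_
  PySem.List.pyGetD c_p_1 (PySem.List.len c_p_1 - 1) ("", 0)
    == PySem.List.pyGetD c_p_2 (PySem.List.len c_p_2 - 1) ("", 0)

-- ===== PORT B =====
def pvWinner (seq : List String) : Option (String × Int) :=
  let counts := seq.foldl (fun d t => d.insert t (d.getD t 0 + 1))
    (PySem.Dict.empty : PySem.Dict String Int)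
  counts.items.foldl
    (fun best item =>
      match best with
      | none => some item
      | some b => if b.2 ≤ item.2 then some item else some b)
    none

def pos_most_same_alt (pos_1 : List String) (pos_2 : List String) : Bool :=
  pvWinner pos_1 == pvWinner pos_2

-- ===== PRECONDITION & SPEC =====
-- A raises IndexError (c_p[-1] on an empty sorted list) when either sequence is empty; excluded.
def Pre_pos_most_same (pos_1 : List String) (pos_2 : List String) : Prop :=
  pos_1 ≠ [] ∧ pos_2 ≠ []
instance (pos_1 : List String) (pos_2 : List String) : Decidable (Pre_pos_most_same pos_1 pos_2) := by
  unfold Pre_pos_most_same; infer_instance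
def pvWitness_pos_most_same : List String × List String := (["NN", "VB", "NN"], ["VB"])

def Spec_pos_most_same (pos_1 : List String) (pos_2 : List String) (out : Bool) : Prop :=
  out = pos_most_same_alt pos_1 pos_2
instance (pos_1 : List String) (pos_2 : List String) (out : Bool) : Decidable (Spec_pos_most_same pos_1 pos_2 out) := by
  unfold Spec_pos_most_same; infer_instance

-- ===== CLAIM (what is proved, stated in full; the proofs are below) =====
def Claim_equal_pos_most_same : Prop := ∀ (pos_1 : List String) (pos_2 : List String), Dom_pos_most_same pos_1 pos_2 → Pre_pos_most_same pos_1 pos_2 → Spec_pos_most_same pos_1 pos_2 (pos_most_same pos_1 pos_2)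

-- ===== LEMMAS AND PROOFS =====

-- B's selection step, on Option (as in the port) and on plain pairs
def pvStepO (best : Option (String × Int)) (item : String × Int) : Option (String × Int) :=
  match best with
  | none => some item
  | some b => if b.2 ≤ item.2 then some item else some b

def pvStep (b item : String × Int) : String × Int := if b.2 ≤ item.2 then item else b

-- the off-by-one shift between A's counts and B's real counts
def pvShift (p : String × Int) : String × Int := (p.1, p.2 - 1)

lemma pvStepO_some (b i : String × Int) : pvStepO (some b) i = some (pvStep b i) := by
  simp only [pvStepO, pvStep]
  split <;> rfl

lemma pvCountA_items (xs : List String) :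
    (pvCountA xs).items
      = (PySem.Set.ofList xs).map (fun k => (k, (xs.count k : Int) - 1)) := by
  induction xs using List.reverseRecOn with
  | nil => rfl
  | append_singleton l x ih =>
    have hstep : pvCountA (l ++ [x])
        = (if (pvCountA l).contains x then
            (pvCountA l).insert x ((pvCountA l).getD x 0 + 1)
          else (pvCountA l).setdefault x 0) := by
      simp [pvCountA, List.foldl_append]
    have hkeys : (pvCountA l).keys = PySem.Set.ofList l := by
      simp only [PySem.Dict.keys, ih, List.map_map]
      exact (List.map_congr_left fun a _ => rfl).trans (List.map_id _)
    have hnodup : (pvCountA l).keys.Nodup := hkeys ▸ PySem.Set.nodup_ofList l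
    have hcont : (pvCountA l).contains x = decide (x ∈ l) := by
      rw [PySem.Dict.contains_eq_decide_mem_keys, hkeys]
      simp [PySem.Set.mem_ofList]
    by_cases hx : x ∈ l
    · have hc : (pvCountA l).contains x = true := by simp [hcont, hx]
      have hmem : (x, (l.count x : Int) - 1) ∈ (pvCountA l).items := by
        rw [ih]
        exact List.mem_map.mpr ⟨x, (PySem.Set.mem_ofList l x).mpr hx, rfl⟩
      have hget : (pvCountA l).getD x 0 = (l.count x : Int) - 1 :=
        PySem.Dict.getD_of_mem_items _ hmem hnodup 0
      rw [hstep, if_pos hc, PySem.Dict.items_insert_of_contains _ _ hc, hget, ih,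
        PySem.Set.ofList_append_singleton, PySem.Set.add_of_mem ((PySem.Set.mem_ofList l x).mpr hx),
        List.map_map]
      refine List.map_congr_left (fun k _ => ?_)
      simp only [Function.comp]
      by_cases hk : k = x
      · subst hk
        have hc1 : List.count k [k] = 1 := by simp
        simp only [beq_self_eq_true, if_pos, List.count_append, hc1]
        refine Prod.ext rfl ?_
        push_cast
        omega
      · have hbe : (k == x) = false := by simp [hk]
        have hc0 : List.count k [x] = 0 := List.count_eq_zero.mpr (by simp [hk])
        simp [hbe, List.count_append, hc0]
    · have hc : (pvCountA l).contains x = false := by simp [hcont, hx]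
      rw [hstep, if_neg (by simp [hc]), PySem.Dict.setdefault_of_not_contains _ _ hc,
        PySem.Dict.items_insert_of_not_contains _ _ hc, ih,
        PySem.Set.ofList_append_singleton,
        PySem.Set.add_of_not_mem (fun h => hx ((PySem.Set.mem_ofList l x).mp h)),
        List.map_append]
      congr 1
      · refine List.map_congr_left (fun k hk => ?_)
        have hkx : k ≠ x := fun h => hx (h ▸ (PySem.Set.mem_ofList l k).mp hk)
        have hc0 : List.count k [x] = 0 := List.count_eq_zero.mpr (by simp [hkx])
        simp [List.count_append, hc0]
      · simp [List.count_append, List.count_eq_zero_of_not_mem hx]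

lemma pvOptFold_some (l : List (String × Int)) (b : String × Int) :
    l.foldl pvStepO (some b) = some (l.foldl pvStep b) := by
  induction l generalizing b with
  | nil => rfl
  | cons x t ih =>
    rw [List.foldl_cons, List.foldl_cons, pvStepO_some]
    exact ih _

lemma pvLast_insertBy (x : String × Int) (s : List (String × Int))
    (hs : s.Pairwise (fun a b => a.2 ≤ b.2)) :
    (PySem.List.insertBy (fun a b => decide (a.2 < b.2)) x s).getLast?
      = some (match s.getLast? with
              | none => x
              | some b => pvStep b x) := by
  induction s with
  | nil => rfl
  | cons y ys ih =>
    have hstep : PySem.List.insertBy (fun a b => decide (a.2 < b.2)) x (y :: ys)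
        = if x.2 < y.2 then x :: y :: ys else y :: PySem.List.insertBy (fun a b => decide (a.2 < b.2)) x ys := by
      simp [PySem.List.insertBy]
    rw [hstep]
    by_cases h : x.2 < y.2
    · rw [if_pos h, List.getLast?_cons_cons]
      obtain ⟨b, hb⟩ : ∃ b, (y :: ys).getLast? = some b := ⟨_, List.getLast?_eq_some_getLast (List.cons_ne_nil y ys)⟩
      have hyb : y.2 ≤ b.2 := by
        rcases List.mem_cons.mp (List.mem_of_getLast? hb) with hm | hm
        · rw [hm]
        · exact (List.pairwise_cons.mp hs).1 b hm
      have hbx : ¬ b.2 ≤ x.2 := by omega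
      rw [hb]
      simp [pvStep, hbx]
    · rw [if_neg h]
      cases ys with
      | nil =>
        show (y :: [x]).getLast? = _
        simp [pvStep, if_pos (by omega : y.2 ≤ x.2)]
      | cons z t =>
        have hne : PySem.List.insertBy (fun a b => decide (a.2 < b.2)) x (z :: t) ≠ [] := by
          simp only [PySem.List.insertBy]
          split <;> simp
        obtain ⟨c, cs, hc⟩ := List.exists_cons_of_ne_nil hne
        rw [hc, List.getLast?_cons_cons, ← hc, ih (List.pairwise_cons.mp hs).2,
          List.getLast?_cons_cons]

lemma pvSorted_last (l : List (String × Int)) :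
    (PySem.List.sorted l (fun p => p.2)).getLast? = l.foldl pvStepO none := by
  induction l using List.reverseRecOn with
  | nil => rfl
  | append_singleton l x ih =>
    have hins : PySem.List.sorted (l ++ [x]) (fun p => p.2)
        = PySem.List.insertBy (fun a b => decide (a.2 < b.2)) x (PySem.List.sorted l (fun p => p.2)) := by
      rw [PySem.List.sorted_eq_foldl_insertBy, PySem.List.sorted_eq_foldl_insertBy,
        List.foldl_append, List.foldl_cons, List.foldl_nil]
    rw [hins, List.foldl_append, List.foldl_cons, List.foldl_nil,
      pvLast_insertBy x _ (PySem.List.sorted_pairwise l (fun p => p.2)), ← ih]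
    cases (PySem.List.sorted l (fun p => p.2)).getLast? with
    | none => rfl
    | some b => rw [pvStepO_some]

lemma pvShift_fold (l : List (String × Int)) (b : Option (String × Int)) :
    (l.map pvShift).foldl pvStepO (b.map pvShift) = (l.foldl pvStepO b).map pvShift := by
  induction l generalizing b with
  | nil => rfl
  | cons x t ih =>
    simp only [List.map_cons, List.foldl_cons]
    have : pvStepO (b.map pvShift) (pvShift x) = (pvStepO b x).map pvShift := by
      cases b with
      | none => rfl
      | some p =>
        simp only [pvStepO, Option.map_some, pvShift]
        by_cases h : p.2 ≤ x.2
        · rw [if_pos h, if_pos (by omega)]; rfl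
        · rw [if_neg h, if_neg (by omega)]; rfl
    rw [this, ← ih]

lemma pvGetD_last (s : List (String × Int)) (h : s ≠ []) (d : String × Int) :
    PySem.List.pyGetD s (PySem.List.len s - 1) d = s.getLast h := by
  have hlen : 0 < s.length := List.length_pos_iff.mpr h
  rw [PySem.List.len_eq, PySem.List.pyGetD_eq_getElem s d (by omega) (by omega),
    List.getLast_eq_getElem h]
  congr 1
  omega

-- A's winner pair is B's winner pair shifted down by one
lemma pvWinner_eq (xs : List String) (h : xs ≠ []) :
    ∃ w, pvWinner xs = some w ∧
      PySem.List.pyGetD (PySem.List.sorted (pvCountA xs).items (fun x => x.2))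
        (PySem.List.len (PySem.List.sorted (pvCountA xs).items (fun x => x.2)) - 1) ("", 0)
      = pvShift w := by
  have hW : pvWinner xs = (PySem.Dict.counter xs).items.foldl pvStepO none := by
    show (xs.foldl (fun d t => d.insert t (d.getD t 0 + 1)) PySem.Dict.empty).items.foldl pvStepO none = _
    rw [PySem.Dict.foldl_insert_getD_add_one_eq_counter]
  have hAB : (pvCountA xs).items = ((PySem.Dict.counter xs).items).map pvShift := by
    rw [PySem.Dict.items_counter, pvCountA_items, List.map_map]
    rfl
  obtain ⟨y, ys, hy⟩ := List.exists_cons_of_ne_nil h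
  have hyo : y ∈ PySem.Set.ofList xs := (PySem.Set.mem_ofList xs y).mpr (by rw [hy]; exact List.mem_cons_self)
  obtain ⟨b0, t, hbt⟩ := List.exists_cons_of_ne_nil
    (l := (PySem.Dict.counter xs).items)
    (by rw [PySem.Dict.items_counter]; exact List.ne_nil_of_mem (List.mem_map_of_mem hyo))
  refine ⟨t.foldl pvStep b0, ?_, ?_⟩
  · rw [hW, hbt, List.foldl_cons]
    exact pvOptFold_some t b0
  have hAne : (pvCountA xs).items ≠ [] := by
    rw [hAB, hbt]; simp
  have hsne : PySem.List.sorted (pvCountA xs).items (fun x => x.2) ≠ [] := by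
    simp [PySem.List.sorted_eq_nil_iff, hAne]
  rw [pvGetD_last _ hsne]
  have hlast : (PySem.List.sorted (pvCountA xs).items (fun x => x.2)).getLast?
      = some (pvShift (t.foldl pvStep b0)) := by
    rw [pvSorted_last, hAB]
    have := pvShift_fold ((PySem.Dict.counter xs).items) none
    simp only [Option.map_none] at this
    rw [this, hbt, List.foldl_cons]
    show (List.foldl pvStepO (pvStepO none b0) t).map pvShift = _
    rw [show pvStepO none b0 = some b0 from rfl, pvOptFold_some]
    rfl
  rw [List.getLast?_eq_some_getLast hsne] at hlast
  exact Option.some_inj.mp hlast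

-- ===== VERDICT (by name: the statement is the Claim_ definition above) =====
theorem pos_most_same_spec : Claim_equal_pos_most_same := by
  intro pos_1 pos_2 _ hpre
  obtain ⟨h1, h2⟩ := hpre
  obtain ⟨w1, hw1, ha1⟩ := pvWinner_eq pos_1 h1
  obtain ⟨w2, hw2, ha2⟩ := pvWinner_eq pos_2 h2
  show pos_most_same pos_1 pos_2 = pos_most_same_alt pos_1 pos_2
  simp only [pos_most_same, pos_most_same_alt]
  rw [hw1, hw2, ha1, ha2]
  rcases w1 with ⟨k1, v1⟩; rcases w2 with ⟨k2, v2⟩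
  show ((k1, v1 - 1) == (k2, v2 - 1)) = (some (k1, v1) == some (k2, v2))
  rw [Bool.eq_iff_iff]
  simp only [beq_iff_eq, Option.some.injEq, Prod.mk.injEq]
  constructor <;> rintro ⟨hk, hv⟩ <;> exact ⟨hk, by omega⟩
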